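-- pv_equiv track=rewrite | github.com/Khasirah/hacker-rank | climbing_the_leaderboard.py | climbingTheLeaderboard
-- ===== SOURCE A (Python) =====
-- def climbingTheLeaderboard(r, p):
--     # hasil
--     h = []
--     # ranking saat ini
--     rSI = 0
--     for p_itr in p:
--         for i in range(len(r)):
--             if i == 0 or r[i] != r[i-1]:
--                 rSI += 1
--
--             if p_itr > r[i] and rSI == 1:
--                 h.append(rSI)
--                 break
--
--             if p_itr > r[i]:
--                 h.append(rSI)
--                 break
--
--             if p_itr == r[i]:
--                 h.append(rSI)
--                 break
--
--             if (p_itr < r[i]) and (i == len(r)-1):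
--                 h.append(rSI+1)
--                 continue
--
--             if p_itr < r[i]:
--                 continue
--         rSI = 0
--
--     return h
-- ===== SOURCE B (Python) =====
-- def climbingTheLeaderboard(r, p):
--     # Build once: strictly-decreasing prefix minima of r with their dense-run ranks,
--     # then binary-search each player score instead of rescanning r per player.
--     vals = []   # prefix minima of r, strictly decreasing
--     rks = []    # dense (adjacent-run) rank at each prefix-min position
--     rank = 0
--     prev = None
--     for x in r:
--         if prev is None or x != prev:
--             rank += 1
--         if not vals or x < vals[-1]:
--             vals.append(x)
--             rks.append(rank)
--         prev = x
--     res = []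
--     for q in p:
--         lo, hi = 0, len(vals)
--         while lo < hi:
--             mid = (lo + hi) // 2
--             if vals[mid] <= q:
--                 hi = mid
--             else:
--                 lo = mid + 1
--         res.append(rks[lo] if lo < len(vals) else rank + 1)
--     return res
-- ===== Notes on version B (the rewrite author's own statement) =====
-- stated objective: faster
-- what changed: Instead of rescanning the whole leaderboard and recomputing the dense rank for every player, B builds the strictly-decreasing list of prefix minima of r with their dense ranks once and answers each player score by binary search over it.
-- intended difference: On an empty leaderboard r=[] with players p!=[], A's inner loop never runs so A returns [] (dropping every player), while B returns rank 1 for each player, the intended dense rank on an empty board. — e.g. on climbingTheLeaderboard([], [0]): A returns [], B returns [1]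
import Mathlib
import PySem

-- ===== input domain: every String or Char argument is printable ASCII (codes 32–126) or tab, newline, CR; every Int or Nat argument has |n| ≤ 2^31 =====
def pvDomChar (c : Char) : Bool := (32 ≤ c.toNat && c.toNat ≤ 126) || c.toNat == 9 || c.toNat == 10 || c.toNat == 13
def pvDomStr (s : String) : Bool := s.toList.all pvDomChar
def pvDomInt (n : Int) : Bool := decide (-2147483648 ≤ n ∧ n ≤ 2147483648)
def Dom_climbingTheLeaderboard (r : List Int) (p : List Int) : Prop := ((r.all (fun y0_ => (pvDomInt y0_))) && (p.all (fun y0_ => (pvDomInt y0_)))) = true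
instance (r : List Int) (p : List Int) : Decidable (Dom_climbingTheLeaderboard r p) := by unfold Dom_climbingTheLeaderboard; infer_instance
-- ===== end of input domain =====

-- B replaces A's per-player rescan of r by a one-time prefix-minima/dense-rank table plus binary search (measured faster).
-- ===== PORT A =====
-- inner 'for i in range(len(r))' loop of A, one player q; h is the accumulated output list
def pvAInner (r : List Int) (q : Int) : List Int → Int → List Int → List Int
  | [], _, h => h
  | i :: is, rSI, h =>
    let rSI := if i == 0 || PySem.List.pyGetD r i 0 != PySem.List.pyGetD r (i - 1) 0 then rSI + 1 else rSI
    if q > PySem.List.pyGetD r i 0 && rSI == 1 then h ++ [rSI]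
    else if q > PySem.List.pyGetD r i 0 then h ++ [rSI]
    else if q == PySem.List.pyGetD r i 0 then h ++ [rSI]
    else if q < PySem.List.pyGetD r i 0 && i == (r.length : Int) - 1 then
      pvAInner r q is rSI (h ++ [rSI + 1])
    else if q < PySem.List.pyGetD r i 0 then pvAInner r q is rSI h
    else pvAInner r q is rSI h

def climbingTheLeaderboard (r : List Int) (p : List Int) : List Int :=
  p.foldl (fun h q => pvAInner r q (PySem.List.pyRange 0 r.length 1) 0 h) []

-- ===== PORT B =====
-- binary search: leftmost lo in [lo,hi) with vals[lo] ≤ q (B's while-loop;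
-- the fuel argument hi - lo only bounds the iteration count, it never changes the result)
def pvBSearchF (vals : List Int) (q : Int) : Nat → Nat → Nat → Nat
  | 0, lo, _ => lo
  | fuel + 1, lo, hi =>
    if lo < hi then
      let mid := (lo + hi) / 2
      if PySem.List.pyGetD vals (mid : Int) 0 ≤ q then pvBSearchF vals q fuel lo mid
      else pvBSearchF vals q fuel (mid + 1) hi
    else lo

def pvBSearch (vals : List Int) (q : Int) (lo hi : Nat) : Nat :=
  pvBSearchF vals q (hi - lo) lo hi

-- B's first loop: fold over r with state (vals, rks, rank, prev)
def pvBuildStep (st : List Int × List Int × Int × Option Int) (x : Int) :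
    List Int × List Int × Int × Option Int :=
  let (vals, rks, rank, prev) := st
  let rank := if prev.isNone || some x != prev then rank + 1 else rank
  if vals.isEmpty || x < PySem.List.pyGetD vals (-1) 0 then
    (vals ++ [x], rks ++ [rank], rank, some x)
  else (vals, rks, rank, some x)

def climbingTheLeaderboard_alt (r : List Int) (p : List Int) : List Int :=
  let st := r.foldl pvBuildStep ([], [], 0, none)
  let vals := st.1
  let rks := st.2.1
  let rank := st.2.2.1
  p.foldl (fun res q =>
    let lo := pvBSearch vals q 0 vals.length
    res ++ [if lo < vals.length then PySem.List.pyGetD rks (lo : Int) 0 else rank + 1]) []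

-- ===== PRECONDITION & SPEC =====
-- On r = [] with p ≠ [], A's inner loop never runs, so A returns [] (it drops every player);
-- B returns dense rank 1 for each player, the intended value on an empty leaderboard.
def D_climbingTheLeaderboard (r : List Int) (p : List Int) : Prop := r = [] ∧ p ≠ []
instance (r : List Int) (p : List Int) : Decidable (D_climbingTheLeaderboard r p) := by
  unfold D_climbingTheLeaderboard; infer_instance
def Spec_climbingTheLeaderboard (r : List Int) (p : List Int) (out : List Int) : Prop :=
  ¬ D_climbingTheLeaderboard r p → out = climbingTheLeaderboard_alt r p
instance (r : List Int) (p : List Int) (out : List Int) : Decidable (Spec_climbingTheLeaderboard r p out) := by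
  unfold Spec_climbingTheLeaderboard; infer_instance
def pvDiffWitness_climbingTheLeaderboard : List Int × List Int := ([], [0])
def pvDiffWitnessOut_climbingTheLeaderboard : (List Int) × (List Int) := ([], [1])

-- ===== CLAIM (what is proved, stated in full; the proofs are below) =====
def Claim_unchanged_climbingTheLeaderboard : Prop := ∀ (r : List Int) (p : List Int), Dom_climbingTheLeaderboard r p → Spec_climbingTheLeaderboard r p (climbingTheLeaderboard r p)
def Claim_changed_climbingTheLeaderboard : Prop := Dom_climbingTheLeaderboard (pvDiffWitness_climbingTheLeaderboard.1) (pvDiffWitness_climbingTheLeaderboard.2) ∧ D_climbingTheLeaderboard (pvDiffWitness_climbingTheLeaderboard.1) (pvDiffWitness_climbingTheLeaderboard.2) ∧ climbingTheLeaderboard (pvDiffWitness_climbingTheLeaderboard.1) (pvDiffWitness_climbingTheLeaderboard.2) = pvDiffWitnessOut_climbingTheLeaderboard.1 ∧ climbingTheLeaderboard_alt (pvDiffWitness_climbingTheLeaderboard.1) (pvDiffWitness_climbingTheLeaderboard.2) = pvDiffWitnessOut_climbingTheLeaderboard.2 ∧ pvDiffWitnessOut_climbingTheLeaderboard.1 ≠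 pvDiffWitnessOut_climbingTheLeaderboard.2
def Claim_exact_climbingTheLeaderboard : Prop := ∀ (r : List Int) (p : List Int), Dom_climbingTheLeaderboard r p → D_climbingTheLeaderboard r p → climbingTheLeaderboard r p ≠ climbingTheLeaderboard_alt r p

-- ===== LEMMAS AND PROOFS =====

-- reference function: dense rank of q in r, by a single left-to-right scan
def pvRefGo (q : Int) : List Int → Option Int → Int → Int
  | [], _, rank => rank + 1
  | x :: xs, prev, rank =>
    if q ≥ x then (if prev = some x then rank else rank + 1)
    else pvRefGo q xs (some x) (if prev = some x then rank else rank + 1)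

def pvRef (r : List Int) (q : Int) : Int := pvRefGo q r none 0

-- first-match scan over the (value, rank) table with default d
def pvLin (q : Int) : List (Int × Int) → Int → Int
  | [], d => d
  | (v, k) :: rest, d => if v ≤ q then k else pvLin q rest d

theorem pvLin_append (q : Int) (l1 l2 : List (Int × Int)) (d : Int) :
    pvLin q (l1 ++ l2) d = pvLin q l1 (pvLin q l2 d) := by
  induction l1 with
  | nil => rfl
  | cons hd tl ih => obtain ⟨v, k⟩ := hd; simp only [List.cons_append, pvLin]; rw [ih]

theorem pvLin_const (q : Int) (l : List (Int × Int)) (d d' : Int)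
    (h : ∃ pr ∈ l, pr.1 ≤ q) : pvLin q l d = pvLin q l d' := by
  induction l with
  | nil => simp at h
  | cons hd tl ih =>
    obtain ⟨v, k⟩ := hd
    simp only [pvLin]
    by_cases hv : v ≤ q
    · simp [hv]
    · simp only [if_neg hv]
      apply ih
      obtain ⟨pr, hpr, hle⟩ := h
      rcases List.mem_cons.mp hpr with h1 | h2
      · exact absurd (by rw [show pr.1 = v from congrArg Prod.fst h1] at hle; exact hle) hv
      · exact ⟨pr, h2, hle⟩

-- in a strictly decreasing list the last element is minimal
theorem pvLast_min (vals : List Int) (hne : vals ≠ []) (hdec : vals.Pairwise (· > ·)) :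
    ∀ v ∈ vals, vals.getLast hne ≤ v := by
  induction vals with
  | nil => exact absurd rfl hne
  | cons a tl ih =>
    intro v hv
    rcases List.mem_cons.mp hv with h1 | h2
    · subst h1
      rcases List.eq_nil_or_concat tl with ht | ⟨l2, b, hcat⟩
      · subst ht; rw [List.getLast_singleton]
      · have htne : tl ≠ [] := by subst hcat; simp
        rw [List.getLast_cons htne]
        have hlast := List.getLast_mem htne
        have := (List.pairwise_cons.mp hdec).1 _ hlast
        omega
    · have htne : tl ≠ [] := by rintro rfl; simp at h2
      rw [List.getLast_cons htne]
      exact ih htne (List.pairwise_cons.mp hdec).2 v h2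

-- B's build loop: the table answers every query like the reference scan, and is well-formed
theorem pvBuild_inv (rest : List Int) :
    ∀ (vals rks : List Int) (rank : Int) (prev : Option Int),
    vals.length = rks.length →
    vals.Pairwise (· > ·) →
    (let st := rest.foldl pvBuildStep (vals, rks, rank, prev)
     st.1.length = st.2.1.length ∧ st.1.Pairwise (· > ·) ∧
     ∀ q : Int, pvLin q (st.1.zip st.2.1) (st.2.2.1 + 1)
        = pvLin q (vals.zip rks) (pvRefGo q rest prev rank)) := by
  induction rest with
  | nil => intro vals rks rank prev hlen hdec; exact ⟨hlen, hdec, fun q => rfl⟩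
  | cons x xs ih =>
    intro vals rks rank prev hlen hdec
    simp only [List.foldl_cons]
    set rank1 := if prev.isNone || some x != prev then rank + 1 else rank with hrank1
    have hrank1' : rank1 = if prev = some x then rank else rank + 1 := by
      rcases prev with _ | pv
      · simp [hrank1]
      · rcases eq_or_ne pv x with h | h
        · subst h; simp [hrank1]
        · simp [hrank1, bne, h, Ne.symm h]
    have hstep : pvBuildStep (vals, rks, rank, prev) x =
        (if vals.isEmpty || x < PySem.List.pyGetD vals (-1) 0 then
           (vals ++ [x], rks ++ [rank1], rank1, some x)
         else (vals, rks, rank1, some x)) := rfl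
    by_cases happ : (vals.isEmpty || decide (x < PySem.List.pyGetD vals (-1) 0)) = true
    · rw [hstep]; simp only [happ, if_true]
      have hxlt : ∀ v ∈ vals, v > x := by
        intro v hv
        have hne : vals ≠ [] := by rintro rfl; simp at hv
        have hx : x < PySem.List.pyGetD vals (-1) 0 := by
          rcases (by simpa using happ :
              vals.isEmpty = true ∨ x < PySem.List.pyGetD vals (-1) 0) with h | h
          · exact absurd (List.isEmpty_iff.mp h) hne
          · exact h
        rw [PySem.List.pyGetD_neg_one vals 0 hne] at hx
        have := pvLast_min vals hne hdec v hv
        omega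
      have hdec' : (vals ++ [x]).Pairwise (· > ·) := by
        rw [List.pairwise_append]
        exact ⟨hdec, List.pairwise_singleton _ _, fun a ha b hb => by
          rw [List.mem_singleton] at hb; subst hb; exact hxlt a ha⟩
      have hlen' : (vals ++ [x]).length = (rks ++ [rank1]).length := by simp [hlen]
      obtain ⟨hl, hd, hq⟩ := ih (vals ++ [x]) (rks ++ [rank1]) rank1 (some x) hlen' hdec'
      refine ⟨hl, hd, fun q => ?_⟩
      rw [hq q]
      rw [List.zip_append hlen, pvLin_append]
      show _ = pvLin q (vals.zip rks) (pvRefGo q (x :: xs) prev rank)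
      simp [pvLin, pvRefGo, ← hrank1']
    · rw [hstep]
      rw [if_neg (by simpa using happ)]
      have hne : vals ≠ [] := by rintro rfl; simp at happ
      obtain ⟨hl, hd, hq⟩ := ih vals rks rank1 (some x) hlen hdec
      refine ⟨hl, hd, fun q => ?_⟩
      rw [hq q]
      show _ = pvLin q (vals.zip rks) (pvRefGo q (x :: xs) prev rank)
      simp only [pvRefGo, ← hrank1']
      by_cases hq2 : q ≥ x
      · rw [if_pos hq2]
        have hlast : PySem.List.pyGetD vals (-1) 0 = vals.getLast hne :=
          PySem.List.pyGetD_neg_one vals 0 hne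
        have hxge : vals.getLast hne ≤ x := by
          by_contra hlt
          push_neg at hlt
          exact happ (by simp only [Bool.or_eq_true, decide_eq_true_eq, hlast]; right; omega)
        have hmem : ∃ pr ∈ vals.zip rks, pr.1 = vals.getLast hne := by
          have : vals.getLast hne ∈ (vals.zip rks).map Prod.fst := by
            rw [List.map_fst_zip (le_of_eq hlen)]
            exact List.getLast_mem hne
          obtain ⟨pr, hpr, hfst⟩ := List.mem_map.mp this
          exact ⟨pr, hpr, hfst⟩
        obtain ⟨pr, hpr, hfst⟩ := hmem
        exact pvLin_const q _ _ _ ⟨pr, hpr, by omega⟩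
      · rw [if_neg hq2]

-- index of the first table value ≤ q (length if none)
def pvFirst (q : Int) : List Int → Nat
  | [] => 0
  | v :: vs => if v ≤ q then 0 else pvFirst q vs + 1

theorem pvLin_eq_first (q : Int) (vals : List Int) : ∀ (rks : List Int) (d : Int),
    vals.length = rks.length →
    pvLin q (vals.zip rks) d =
      if pvFirst q vals < vals.length then rks.getD (pvFirst q vals) 0 else d := by
  induction vals with
  | nil => intro rks d _; simp [pvLin, pvFirst]
  | cons v vs ih =>
    intro rks d hlen
    match rks with
    | [] => simp at hlen
    | k :: ks =>
      simp only [List.zip_cons_cons, pvLin, pvFirst]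
      by_cases hv : v ≤ q
      · simp [hv]
      · simp only [if_neg hv]
        rw [ih ks d (by simpa using hlen)]
        simp only [List.length_cons]
        by_cases hlt : pvFirst q vs < vs.length
        · rw [if_pos hlt, if_pos (by omega)]
          simp [List.getD_cons_succ]
        · rw [if_neg hlt, if_neg (by omega)]

theorem pvFirst_eq (q : Int) (vals : List Int) : ∀ (i : Nat), i ≤ vals.length →
    (∀ j (_ : j < vals.length), j < i → ¬ vals[j] ≤ q) →
    (∀ (_ : i < vals.length), vals[i] ≤ q) →
    pvFirst q vals = i := by
  induction vals with
  | nil =>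
    intro i hi _ _
    simp only [List.length_nil, Nat.le_zero] at hi
    subst hi; rfl
  | cons v vs ih =>
    intro i hi h1 h2
    simp only [pvFirst]
    by_cases hv : v ≤ q
    · rw [if_pos hv]
      by_contra hne
      exact h1 0 (by simp) (by omega) hv
    · rw [if_neg hv]
      match i with
      | 0 => exact absurd (h2 (Nat.zero_lt_succ _)) hv
      | i' + 1 =>
        have := ih i' (by simpa using hi)
          (fun j hj hji => h1 (j + 1) (by simpa using hj) (by omega))
          (fun h => h2 (by simpa using h))
        omega

theorem pvBSearchF_eq (vals : List Int) (q : Int) (hdec : vals.Pairwise (· > ·)) :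
    ∀ (n lo hi : Nat), hi - lo ≤ n → lo ≤ hi → hi ≤ vals.length →
    (∀ j (_ : j < vals.length), j < lo → ¬ vals[j] ≤ q) →
    (∀ j (_ : j < vals.length), hi ≤ j → vals[j] ≤ q) →
    pvBSearchF vals q n lo hi = pvFirst q vals := by
  intro n
  induction n with
  | zero =>
    intro lo hi hn hle hhi h1 h2
    have hlohi : lo = hi := by omega
    subst hlohi
    exact (pvFirst_eq q vals lo (by omega) h1 (fun h => h2 lo h (by omega))).symm
  | succ n ihn =>
    intro lo hi hn hle hhi h1 h2
    by_cases hlt : lo < hi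
    · rw [pvBSearchF, if_pos hlt]
      have hmid : (lo + hi) / 2 < vals.length := by omega
      have hg : PySem.List.pyGetD vals (((lo + hi) / 2 : Nat) : Int) 0
          = vals[(lo + hi) / 2] := by
        rw [PySem.List.pyGetD_natCast, List.getD_eq_getElem _ _ hmid]
      by_cases hc : PySem.List.pyGetD vals (((lo + hi) / 2 : Nat) : Int) 0 ≤ q
      · rw [if_pos hc]
        refine ihn lo _ (by omega) (by omega) (by omega) h1 ?_
        intro j hj hmj
        rcases Nat.eq_or_lt_of_le hmj with he | hlt2
        · subst he; rw [← hg]; exact hc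
        · have := List.pairwise_iff_getElem.mp hdec _ _ hmid hj hlt2
          rw [hg] at hc; omega
      · rw [if_neg hc]
        refine ihn _ hi (by omega) (by omega) hhi ?_ h2
        intro j hj hji
        by_cases hjlo : j < lo
        · exact h1 j hj hjlo
        · rw [hg] at hc
          rcases Nat.lt_or_ge j ((lo + hi) / 2) with hlt2 | hge
          · have := List.pairwise_iff_getElem.mp hdec _ _ hj hmid hlt2
            omega
          · have : j = (lo + hi) / 2 := by omega
            subst this; omega
    · rw [pvBSearchF, if_neg hlt]
      have hlohi : lo = hi := by omega
      subst hlohi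
      exact (pvFirst_eq q vals lo (by omega) h1 (fun h => h2 lo h (by omega))).symm

-- the per-query expression of B's second loop, under the build invariants
theorem pvQuery_eq (vals rks : List Int) (rank : Int) (q : Int)
    (hlen : vals.length = rks.length) (hdec : vals.Pairwise (· > ·)) :
    (if pvBSearch vals q 0 vals.length < vals.length then
       PySem.List.pyGetD rks ((pvBSearch vals q 0 vals.length : Nat) : Int) 0
     else rank + 1) = pvLin q (vals.zip rks) (rank + 1) := by
  rw [show pvBSearch vals q 0 vals.length = pvBSearchF vals q (vals.length - 0) 0 vals.length from rfl]
  rw [pvBSearchF_eq vals q hdec (vals.length - 0) 0 vals.length (by omega) (by omega) (le_refl _)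
    (fun j hj hji => by omega) (fun j hj hji => by omega)]
  rw [pvLin_eq_first q vals rks (rank + 1) hlen]
  by_cases h : pvFirst q vals < vals.length
  · rw [if_pos h, if_pos h, PySem.List.pyGetD_natCast]
  · rw [if_neg h, if_neg h]

-- A's inner loop from index i ≥ 1 equals the reference scan of the remaining suffix
theorem pvAInner_gen (r : List Int) (q : Int) :
    ∀ (k i : Nat) (rank : Int) (h : List Int), 1 ≤ i → i < r.length → r.length - i = k →
    pvAInner r q (PySem.List.pyRange (i : Int) (r.length : Int) 1) rank h
      = h ++ [pvRefGo q (r.drop i) (some (r.getD (i - 1) 0)) rank] := by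
  intro k
  induction k using Nat.strong_induction_on with
  | _ k ihk =>
    intro i rank h hi1 hilen hk
    rw [PySem.List.pyRange_one_cons (by exact_mod_cast hilen)]
    simp only [pvAInner]
    have hxi : PySem.List.pyGetD r (i : Int) 0 = r.getD i 0 := by simp
    have hpi : PySem.List.pyGetD r ((i : Int) - 1) 0 = r.getD (i - 1) 0 := by
      have h1 : ((i : Int) - 1) = ((i - 1 : Nat) : Int) := by omega
      rw [h1]; simp
    have hiz : ((i : Int) == 0) = false := by
      simp only [beq_eq_false_iff_ne, ne_eq, Int.natCast_eq_zero]
      omega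
    rw [hxi, hpi, hiz]
    simp only [Bool.false_or]
    set x := r.getD i 0 with hx
    set pr := r.getD (i - 1) 0 with hpr
    set rk := if (x != pr) = true then rank + 1 else rank with hrkdef
    have hrk : rk = if (some pr : Option Int) = some x then rank else rank + 1 := by
      rcases eq_or_ne x pr with he | hne
      · simp [hrkdef, he]
      · simp [hrkdef, hne, Ne.symm hne]
    have hdrop : r.drop i = x :: r.drop (i + 1) := by
      rw [List.drop_eq_getElem_cons hilen, hx, List.getD_eq_getElem _ _ hilen]
    rw [hdrop]
    simp only [pvRefGo, ← hrk]
    rcases lt_trichotomy q x with hq | hq | hq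
    · -- q < r[i]
      rw [if_neg (by simp; omega)]
      rw [if_neg (by omega : ¬ q > x)]
      rw [if_neg (by simp; omega)]
      rw [if_neg (by omega : ¬ q ≥ x)]
      by_cases hi' : i = r.length - 1
      · rw [if_pos (by simp only [Bool.and_eq_true, decide_eq_true_eq, beq_iff_eq]; exact ⟨hq, by omega⟩)]
        rw [PySem.List.pyRange_one_eq_nil (by omega)]
        have hde : r.drop (i + 1) = [] := List.drop_eq_nil_of_le (by omega)
        rw [hde]
        rfl
      · rw [if_neg (by simp only [Bool.and_eq_true, decide_eq_true_eq, beq_iff_eq]; rintro ⟨-, hc⟩; omega)]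
        rw [if_pos hq]
        have hcast : ((i : Int) + 1) = ((i + 1 : Nat) : Int) := by omega
        rw [hcast, ihk (k - 1) (by omega) (i + 1) rk h (by omega) (by omega) (by omega)]
        congr 2
    · -- q = r[i]
      rw [if_neg (by simp; omega)]
      rw [if_neg (by omega : ¬ q > x)]
      rw [if_pos (by simp [hq])]
      rw [if_pos (by omega : q ≥ x)]
    · -- q > r[i]
      rw [if_pos (by omega : q ≥ x)]
      by_cases hb : (rk == (1 : Int)) = true
      · rw [if_pos (by simp only [Bool.and_eq_true, decide_eq_true_eq]; exact ⟨hq, hb⟩)]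
      · rw [if_neg (by simp only [Bool.and_eq_true, decide_eq_true_eq]; rintro ⟨-, hc⟩; exact hb hc)]
        rw [if_pos hq]

-- A's inner loop over the whole range equals the reference value, for r ≠ []
theorem pvAInner_eq (r : List Int) (q : Int) (hne : r ≠ []) (h : List Int) :
    pvAInner r q (PySem.List.pyRange 0 (r.length : Int) 1) 0 h = h ++ [pvRef r q] := by
  have hlen : 0 < r.length := List.length_pos_iff.mpr hne
  rw [PySem.List.pyRange_one_cons (by exact_mod_cast hlen)]
  simp only [pvAInner]
  have hx0 : PySem.List.pyGetD r (0 : Int) 0 = r.getD 0 0 := by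
    simpa using PySem.List.pyGetD_natCast (xs := r) (n := 0) (d := 0)
  have hiz : ((0 : Int) == 0) = true := by decide
  rw [hx0, hiz]
  simp only [Bool.true_or, eq_self_iff_true, if_true]
  set x := r.getD 0 0 with hx
  have hdrop : r = x :: r.drop 1 := by
    match r, hne with
    | a :: t, _ => simp [hx]
  unfold pvRef
  rw [(by rw [← hdrop] : pvRefGo q r none 0 = pvRefGo q (x :: r.drop 1) none 0)]
  simp only [pvRefGo]
  rw [if_neg (by simp : ¬ (none : Option Int) = some x)]
  rcases lt_trichotomy q x with hq | hq | hq
  · -- q < r[0]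
    rw [if_neg (by simp; omega)]
    rw [if_neg (by omega : ¬ q > x)]
    rw [if_neg (by simp; omega)]
    rw [if_neg (by omega : ¬ q ≥ x)]
    by_cases hi' : r.length = 1
    · rw [if_pos (by simp only [Bool.and_eq_true, decide_eq_true_eq, beq_iff_eq]; exact ⟨hq, by omega⟩)]
      rw [PySem.List.pyRange_one_eq_nil (by omega)]
      have hde : r.drop 1 = [] := List.drop_eq_nil_of_le (by omega)
      rw [hde]
      rfl
    · rw [if_neg (by simp only [Bool.and_eq_true, decide_eq_true_eq, beq_iff_eq]; rintro ⟨-, hc⟩; omega)]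
      rw [if_pos hq]
      rw [(by norm_num : ((0 : Int) + 1) = ((1 : Nat) : Int))]
      rw [pvAInner_gen r q (r.length - 1) 1 ((1 : Nat) : Int) h (by omega) (by omega) (by omega)]
  · -- q = r[0]
    rw [if_neg (by simp; omega)]
    rw [if_neg (by omega : ¬ q > x)]
    rw [if_pos (by simp [hq])]
    rw [if_pos (by omega : q ≥ x)]
  · -- q > r[0]
    rw [if_pos (by omega : q ≥ x)]
    rw [if_pos (by simp only [Bool.and_eq_true, decide_eq_true_eq]; exact ⟨hq, rfl⟩)]

-- A's outer loop, for a nonempty leaderboard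
theorem pvA_map (r : List Int) (hne : r ≠ []) (p : List Int) :
    climbingTheLeaderboard r p = p.map (pvRef r) := by
  unfold climbingTheLeaderboard
  suffices hs : ∀ acc,
      p.foldl (fun h q => pvAInner r q (PySem.List.pyRange 0 r.length 1) 0 h) acc
        = acc ++ p.map (pvRef r) by
    simpa using hs []
  induction p with
  | nil => intro acc; simp
  | cons q qs ih =>
    intro acc
    simp only [List.foldl_cons, List.map_cons]
    rw [pvAInner_eq r q hne acc, ih]
    simp

-- B's two loops: table build + binary-searched queries
theorem pvB_map (r p : List Int) : climbingTheLeaderboard_alt r p = p.map (pvRef r) := by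
  unfold climbingTheLeaderboard_alt
  obtain ⟨hl, hd, hq⟩ := pvBuild_inv r [] [] 0 none rfl List.Pairwise.nil
  set st := r.foldl pvBuildStep ([], [], 0, none) with hst
  have hone : ∀ q : Int,
      (if pvBSearch st.1 q 0 st.1.length < st.1.length then
         PySem.List.pyGetD st.2.1 ((pvBSearch st.1 q 0 st.1.length : Nat) : Int) 0
       else st.2.2.1 + 1) = pvRef r q := by
    intro q
    rw [pvQuery_eq st.1 st.2.1 st.2.2.1 q hl hd, hq q]
    rfl
  suffices hs : ∀ acc,
      p.foldl (fun res q => res ++ [if pvBSearch st.1 q 0 st.1.length < st.1.length then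
         PySem.List.pyGetD st.2.1 ((pvBSearch st.1 q 0 st.1.length : Nat) : Int) 0
       else st.2.2.1 + 1]) acc = acc ++ p.map (pvRef r) by
    simpa using hs []
  induction p with
  | nil => intro acc; simp
  | cons q qs ih =>
    intro acc
    simp only [List.foldl_cons, List.map_cons]
    rw [hone q, ih]
    simp

-- A on the empty leaderboard returns []
theorem pvA_nil (p : List Int) : climbingTheLeaderboard [] p = [] := by
  unfold climbingTheLeaderboard
  induction p with
  | nil => rfl
  | cons q qs ih => simpa using ih

-- ===== VERDICT (by name: the statement is the Claim_ definition above) =====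
theorem climbingTheLeaderboard_spec : Claim_unchanged_climbingTheLeaderboard := by
  intro r p _ hnd
  by_cases hr : r = []
  · have hp : p = [] := by
      by_contra hp
      refine hnd ?_
      unfold D_climbingTheLeaderboard
      exact ⟨hr, hp⟩
    subst hr; subst hp; rfl
  · rw [pvA_map r hr p, pvB_map r p]

theorem climbingTheLeaderboard_changed : Claim_changed_climbingTheLeaderboard := by
  unfold Claim_changed_climbingTheLeaderboard; decide

theorem climbingTheLeaderboard_tight : Claim_exact_climbingTheLeaderboard := by
  intro r p _ hD
  obtain ⟨hr, hp⟩ := hD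
  subst hr
  rw [pvA_nil p]
  intro he
  have hlen := congrArg List.length he
  rw [pvB_map [] p] at hlen
  simp at hlen
  exact hp (List.length_eq_zero_iff.mp hlen.symm)
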